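-- pv_equiv track=rewrite | github.com/ocshasekoki/Treatiseresearch | feedback/GetKoyaku.py | GetKoyaku
-- ===== SOURCE A (Python) =====
-- def GetKoyaku(lottery):
--
--     if lottery <= 769 or lottery > 999:
--         return 0
--
--     low_high_tuples = (
--         (770,894),
--         (895,944),
--         (945,984),
--         (985,992),
--         (993,996),
--         (997,998),
--     )
--     result = 1
--     for low, high in [low_high_tuple for low_high_tuple in low_high_tuples]:
--         if low <= lottery <= high:
--             return result
--         result += 1
--     return result
-- ===== SOURCE B (Python) =====
-- def GetKoyaku(lottery):
--     if lottery <= 769 or lottery > 999: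
--         return 0
--     highs = [894, 944, 984, 992, 996, 998]
--     lo, hi = 0, 6
--     while lo < hi:
--         mid = (lo + hi) // 2
--         if highs[mid] < lottery:
--             lo = mid + 1
--         else:
--             hi = mid
--     return lo + 1
-- ===== Notes on version B (the rewrite author's own statement) =====
-- stated objective: alternative
-- what changed: Replaced the 1-based linear scan over (low,high) interval tuples by a binary search (bisect_left) over a flat sorted table of upper bounds, returning the found position plus one.
import Mathlib
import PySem

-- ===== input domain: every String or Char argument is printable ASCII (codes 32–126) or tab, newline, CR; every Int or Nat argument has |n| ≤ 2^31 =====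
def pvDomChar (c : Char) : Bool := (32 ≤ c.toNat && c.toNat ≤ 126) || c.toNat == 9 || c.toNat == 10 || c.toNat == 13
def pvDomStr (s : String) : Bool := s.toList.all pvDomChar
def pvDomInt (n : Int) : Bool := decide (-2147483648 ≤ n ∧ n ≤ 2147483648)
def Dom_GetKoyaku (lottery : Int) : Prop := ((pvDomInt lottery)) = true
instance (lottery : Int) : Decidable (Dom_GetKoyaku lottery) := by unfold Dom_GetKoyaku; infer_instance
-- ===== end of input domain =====

-- B replaces A's 1-based linear scan over (low,high) tuples by a binary search over a sorted table of upper bounds (objective: alternative).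

-- ===== PORT A =====
-- the loop over the tuple list, carrying the running 1-based `result`
def pvAScan (lottery : Int) : List (Int × Int) → Int → Int
  | [], result => result
  | (low, high) :: rest, result =>
      if low ≤ lottery ∧ lottery ≤ high then result else pvAScan lottery rest (result + 1)

def GetKoyaku (lottery : Int) : Int :=
  if lottery ≤ 769 ∨ lottery > 999 then 0
  else
    pvAScan lottery [(770,894),(895,944),(945,984),(985,992),(993,996),(997,998)] 1

-- ===== PORT B =====
-- bisect_left's while-loop, recursion on hi - lo
def pvBisectLeft (highs : List Int) (x : Int) (lo hi : Nat) : Nat :=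
  if h : lo < hi then
    let mid := (lo + hi) / 2
    if highs.getD mid 0 < x then pvBisectLeft highs x (mid + 1) hi
    else pvBisectLeft highs x lo mid
  else lo
termination_by hi - lo
decreasing_by all_goals omega

def GetKoyaku_alt (lottery : Int) : Int :=
  if lottery ≤ 769 ∨ lottery > 999 then 0
  else (pvBisectLeft [894, 944, 984, 992, 996, 998] lottery 0 6 : Int) + 1

-- ===== PRECONDITION & SPEC =====
def Spec_GetKoyaku (lottery : Int) (out : Int) : Prop := out = GetKoyaku_alt lottery
instance (lottery : Int) (out : Int) : Decidable (Spec_GetKoyaku lottery out) := by unfold Spec_GetKoyaku; infer_instance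

-- ===== CLAIM (what is proved, stated in full; the proofs are below) =====
def Claim_equal_GetKoyaku : Prop := ∀ (lottery : Int), Dom_GetKoyaku lottery → Spec_GetKoyaku lottery (GetKoyaku lottery)

-- ===== LEMMAS AND PROOFS =====
theorem pvEqual_of_mid (lottery : Int) (h1 : 770 ≤ lottery) (h2 : lottery ≤ 999) :
    GetKoyaku lottery = GetKoyaku_alt lottery := by
  -- case out which bucket lottery falls in; each side then evaluates on closed structure
  unfold GetKoyaku GetKoyaku_alt
  rw [if_neg (by omega), if_neg (by omega)]
  by_cases h : lottery ≤ 894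
  · simp [pvAScan, pvBisectLeft]; omega
  by_cases h' : lottery ≤ 944
  · simp [pvAScan, pvBisectLeft]; omega
  by_cases h'' : lottery ≤ 984
  · simp [pvAScan, pvBisectLeft]; omega
  by_cases h3 : lottery ≤ 992
  · simp [pvAScan, pvBisectLeft]; omega
  by_cases h4 : lottery ≤ 996
  · simp [pvAScan, pvBisectLeft]; omega
  by_cases h5 : lottery ≤ 998
  · simp [pvAScan, pvBisectLeft]; omega
  · simp [pvAScan, pvBisectLeft]; omega

-- ===== VERDICT (by name: the statement is the Claim_ definition above) =====
theorem GetKoyaku_spec : Claim_equal_GetKoyaku := by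
  intro lottery _
  unfold Spec_GetKoyaku
  by_cases h : lottery ≤ 769
  · unfold GetKoyaku GetKoyaku_alt
    rw [if_pos (Or.inl h), if_pos (Or.inl h)]
  by_cases h2 : lottery ≤ 999
  · exact pvEqual_of_mid lottery (by omega) h2
  · unfold GetKoyaku GetKoyaku_alt
    rw [if_pos (Or.inr (by omega)), if_pos (Or.inr (by omega))]
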